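-- pv_equiv track=rewrite | github.com/madanlalit/agentskills | chrome-cdp/scripts/cdp.py | format_page_list
-- ===== SOURCE A (Python) =====
-- from typing import Any
--
-- MIN_TARGET_PREFIX_LEN = 8
--
-- def get_display_prefix_length(target_ids: list[str]) -> int:
--     if not target_ids:
--         return MIN_TARGET_PREFIX_LEN
--     max_len = max(len(target_id) for target_id in target_ids)
--     for length in range(MIN_TARGET_PREFIX_LEN, max_len + 1):
--         prefixes = {target_id[:length].upper() for target_id in target_ids}
--         if len(prefixes) == len(target_ids):
--             return length
--     return max_len
--
-- def format_page_list(pages: list[dict[str, Any]]) -> str: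
--     prefix_len = get_display_prefix_length([page["targetId"] for page in pages if page.get("targetId")])
--     lines = []
--     for page in pages:
--         target_id = str(page.get("targetId", ""))[:prefix_len].ljust(prefix_len)
--         title = str(page.get("title", ""))[:54].ljust(54)
--         lines.append(f"{target_id}  {title}  {page.get('url', '')}")
--     return "\n".join(lines)
-- ===== SOURCE B (Python) =====
-- MIN_TARGET_PREFIX_LEN = 8
--
--
-- def _lcp_len(a, b):
--     l = 0
--     m = min(len(a), len(b))
--     while l < m and a[l] == b[l]:
--         l += 1
--     return l
--
--
-- def format_page_list(pages):
--     ids = sorted(page["targetId"].upper() for page in pages if page.get("targetId"))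
--     if not ids:
--         prefix_len = MIN_TARGET_PREFIX_LEN
--     else:
--         max_len = max(len(t) for t in ids)
--         m = 0
--         for a, b in zip(ids, ids[1:]):
--             m = max(m, max_len if a == b else _lcp_len(a, b))
--         prefix_len = min(max(m + 1, MIN_TARGET_PREFIX_LEN), max_len)
--     lines = [
--         f"{page.get('targetId', '')[:prefix_len].ljust(prefix_len)}  "
--         f"{page.get('title', '')[:54].ljust(54)}  "
--         f"{page.get('url', '')}"
--         for page in pages
--     ]
--     return "\n".join(lines)
-- ===== Notes on version B (the rewrite author's own statement) =====
-- stated objective: alternative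
-- what changed: A finds the distinguishing prefix length by re-building, for every candidate length from 8 upward, the whole set of uppercased prefixes; B instead sorts the uppercased ids once and takes the maximum adjacent common-prefix length + 1, clamped into [8, max_len].
import Mathlib
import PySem

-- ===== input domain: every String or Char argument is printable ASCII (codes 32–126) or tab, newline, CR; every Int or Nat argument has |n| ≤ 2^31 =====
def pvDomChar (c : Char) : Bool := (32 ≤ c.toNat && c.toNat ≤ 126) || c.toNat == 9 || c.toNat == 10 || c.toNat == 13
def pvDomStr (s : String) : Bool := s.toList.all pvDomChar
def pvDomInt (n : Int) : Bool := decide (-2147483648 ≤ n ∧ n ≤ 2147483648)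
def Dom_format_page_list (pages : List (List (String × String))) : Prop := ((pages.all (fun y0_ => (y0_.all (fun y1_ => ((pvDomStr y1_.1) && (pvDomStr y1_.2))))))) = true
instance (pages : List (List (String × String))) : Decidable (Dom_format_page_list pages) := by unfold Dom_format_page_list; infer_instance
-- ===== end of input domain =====

-- B replaces A's "grow the length until all uppercased prefixes are distinct" rescan with a different
-- algorithm: sort the uppercased ids once, take the max adjacent common-prefix length + 1, clamp into [8, max_len].

-- str.ljust(w) — not provided by PySem; exact (no padding when w ≤ len); shared by both ports
def pvLjust (s : String) (w : Int) : String :=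
  String.ofList (s.toList ++ List.replicate (w - (PySem.Str.len s : Int)).toNat ' ')

-- ===== PORT A =====
-- the early-return for-loop of get_display_prefix_length: first length whose uppercased prefixes are all distinct
def pvAFind (target_ids : List String) (n : Nat) : List Int → Option Int
  | [] => none
  | L :: rest =>
      if (PySem.Set.ofList (target_ids.map (fun t => PySem.Str.upper (PySem.Str.slice t none (some L))))).length = n
      then some L
      else pvAFind target_ids n rest

def pvGetDisplayPrefixLength : List String → Int
  | [] => 8  -- MIN_TARGET_PREFIX_LEN
  | h :: t =>
    -- max(len(t) for t in target_ids) on the nonempty list (len = List.length of toList, cf. PySem.Chars.len_eq)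
    let maxLen : Nat := t.foldl (fun m s => max m s.toList.length) h.toList.length
    (pvAFind (h :: t) (h :: t).length (PySem.List.pyRange 8 ((maxLen : Int) + 1))).getD (maxLen : Int)

-- str(x) on a string value is the identity; page.get("targetId") is truthy iff present and ≠ ""
def format_page_list (pages : List (List (String × String))) : String :=
  let target_ids := pages.foldl
    (fun acc p => if ((PySem.Dict.mk p).getD "targetId" "") != "" then acc ++ [(PySem.Dict.mk p).getD "targetId" ""] else acc) []
  let prefixLen := pvGetDisplayPrefixLength target_ids
  let lines := pages.foldl (fun acc p =>
      acc ++ [pvLjust (PySem.Str.slice ((PySem.Dict.mk p).getD "targetId" "") none (some prefixLen)) prefixLen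
              ++ "  " ++ pvLjust (PySem.Str.slice ((PySem.Dict.mk p).getD "title" "") none (some 54)) 54
              ++ "  " ++ (PySem.Dict.mk p).getD "url" ""]) []
  PySem.Str.join "\n" lines

-- ===== PORT B =====
-- _lcp_len: the while-loop counting equal leading characters
def pvLcp : List Char → List Char → Nat
  | x :: a, y :: b => if x = y then pvLcp a b + 1 else 0
  | _, _ => 0

-- the "if not ids / else" block of B: max adjacent value over the sorted list, clamped into [8, max_len]
def pvBPrefixLen : List String → Int
  | [] => 8  -- MIN_TARGET_PREFIX_LEN
  | h :: t =>
    let maxLen : Nat := t.foldl (fun m s => max m s.toList.length) h.toList.length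
    let m : Nat := ((h :: t).zip (PySem.List.slice (h :: t) (some 1) none)).foldl
        (fun m p => max m (if p.1 = p.2 then maxLen else pvLcp p.1.toList p.2.toList)) 0
    min (max ((m : Int) + 1) 8) (maxLen : Int)

def format_page_list_alt (pages : List (List (String × String))) : String :=
  let ids := PySem.List.sorted
    ((pages.filter (fun p => ((PySem.Dict.mk p).getD "targetId" "") != "")).map
      (fun p => PySem.Str.upper ((PySem.Dict.mk p).getD "targetId" ""))) (fun x => x)
  let prefixLen := pvBPrefixLen ids
  let lines := pages.map (fun p =>
      pvLjust (PySem.Str.slice ((PySem.Dict.mk p).getD "targetId" "") none (some prefixLen)) prefixLen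
      ++ "  " ++ pvLjust (PySem.Str.slice ((PySem.Dict.mk p).getD "title" "") none (some 54)) 54
      ++ "  " ++ (PySem.Dict.mk p).getD "url" "")
  PySem.Str.join "\n" lines

-- ===== PRECONDITION & SPEC =====
def Spec_format_page_list (pages : List (List (String × String))) (out : String) : Prop := out = format_page_list_alt pages
instance (pages : List (List (String × String))) (out : String) : Decidable (Spec_format_page_list pages out) := by unfold Spec_format_page_list; infer_instance

-- ===== CLAIM (what is proved, stated in full; the proofs are below) =====
def Claim_equal_format_page_list : Prop := ∀ (pages : List (List (String × String))), Dom_format_page_list pages → Spec_format_page_list pages (format_page_list pages)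

-- ===== LEMMAS AND PROOFS =====

theorem pv_foldl_add_len_le {α : Type} [BEq α] [LawfulBEq α] :
    ∀ (xs acc : List α), (xs.foldl PySem.Set.add acc).length ≤ acc.length + xs.length := by
  intro xs
  induction xs with
  | nil => intro acc; simp
  | cons x t ih =>
    intro acc
    have h1 : (PySem.Set.add acc x).length ≤ acc.length + 1 := by
      simp only [PySem.Set.add]; split <;> simp
    have h2 := ih (PySem.Set.add acc x)
    simp only [List.foldl_cons, List.length_cons]
    omega

theorem pv_foldl_add_len_eq_iff {α : Type} [BEq α] [LawfulBEq α] :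
    ∀ (xs acc : List α), ((xs.foldl PySem.Set.add acc).length = acc.length + xs.length
      ↔ xs.Nodup ∧ ∀ x ∈ xs, x ∉ acc) := by
  intro xs
  induction xs with
  | nil => intro acc; simp
  | cons x t ih =>
    intro acc
    simp only [List.foldl_cons, List.length_cons, List.nodup_cons, List.mem_cons]
    by_cases hx : x ∈ acc
    · have hadd : PySem.Set.add acc x = acc := by
        simp [PySem.Set.add, PySem.Set.contains, hx]
      rw [hadd]
      have hle := pv_foldl_add_len_le t acc
      constructor
      · intro h; omega
      · rintro ⟨-, hall⟩
        exact absurd hx (hall x (Or.inl rfl))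
    · have hadd : PySem.Set.add acc x = acc ++ [x] := by
        simp [PySem.Set.add, PySem.Set.contains, hx]
      have e : (acc ++ [x]).length = acc.length + 1 := by simp
      rw [hadd, show acc.length + (t.length + 1) = (acc ++ [x]).length + t.length by omega,
          ih (acc ++ [x])]
      constructor
      · rintro ⟨hnd, hall⟩
        refine ⟨⟨?_, hnd⟩, ?_⟩
        · intro hxt
          exact (hall x hxt) (by simp)
        · intro y hy
          rcases hy with rfl | hyt
          · exact hx
          · intro hyacc
            exact (hall y hyt) (by simp [hyacc])
      · rintro ⟨⟨hxt, hnd⟩, hall⟩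
        refine ⟨hnd, ?_⟩
        intro y hyt hy
        rcases List.mem_append.mp hy with hyacc | hyx
        · exact (hall y (Or.inr hyt)) hyacc
        · have : y = x := by simpa using hyx
          subst this
          exact hxt hyt

theorem pv_setOfList_len_iff_nodup {α : Type} [BEq α] [LawfulBEq α] (xs : List α) :
    (PySem.Set.ofList xs).length = xs.length ↔ xs.Nodup := by
  rw [PySem.Set.ofList_eq_foldl]
  have h := pv_foldl_add_len_eq_iff xs []
  simpa using h

theorem pv_lex_of_lex_take (l : Nat) :
    ∀ (a b : List Char), List.Lex (· < ·) (b.take l) (a.take l) → List.Lex (· < ·) b a := by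
  induction l with
  | zero =>
    intro a b h
    simp only [List.take_zero] at h
    cases h
  | succ l ih =>
    intro a b h
    cases b with
    | nil =>
      cases a with
      | nil => simp only [List.take_nil] at h; cases h
      | cons y as => exact List.Lex.nil
    | cons x bs =>
      cases a with
      | nil => simp only [List.take_nil] at h; cases h
      | cons y as =>
        simp only [List.take_succ_cons] at h
        cases h with
        | rel hr => exact List.Lex.rel hr
        | cons h' => exact List.Lex.cons (ih as bs h')

theorem pv_take_mono {a b : List Char} (l : Nat) (h : a ≤ b) : a.take l ≤ b.take l := by
  by_contra hn
  have h1 : b.take l < a.take l := lt_of_not_ge hn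
  have h2 : b < a := pv_lex_of_lex_take l a b h1
  exact absurd h (not_le.mpr h2)

theorem pv_take_eq_iff_le_lcp :
    ∀ (a b : List Char) (l : Nat), a ≠ b → (a.take l = b.take l ↔ l ≤ pvLcp a b) := by
  intro a
  induction a with
  | nil =>
    intro b l hab
    cases b with
    | nil => exact absurd rfl hab
    | cons y bs =>
      simp only [List.take_nil, pvLcp]
      constructor
      · intro h
        rw [eq_comm, List.take_eq_nil_iff] at h
        rcases h with h0 | h0
        · omega
        · cases h0
      · intro h
        have : l = 0 := by omega
        subst this; simp
  | cons x as ih =>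
    intro b l hab
    cases b with
    | nil =>
      simp only [List.take_nil, pvLcp]
      constructor
      · intro h
        rw [List.take_eq_nil_iff] at h
        rcases h with h0 | h0
        · omega
        · cases h0
      · intro h
        have : l = 0 := by omega
        subst this; simp
    | cons y bs =>
      cases l with
      | zero => simp [pvLcp]
      | succ l =>
        simp only [List.take_succ_cons, List.cons.injEq, pvLcp]
        by_cases hxy : x = y
        · subst hxy
          have hasbs : as ≠ bs := by
            intro e; exact hab (by rw [e])
          rw [if_pos rfl, ih bs l hasbs]
          constructor
          · rintro ⟨-, h⟩; omega
          · intro h; exact ⟨rfl, by omega⟩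
        · rw [if_neg hxy]
          constructor
          · rintro ⟨h, -⟩; exact absurd h hxy
          · intro h; omega

theorem pv_foldl_max_lt {α : Type} (f : α → Nat) :
    ∀ (xs : List α) (init l : Nat),
      (xs.foldl (fun m x => max m (f x)) init < l ↔ init < l ∧ ∀ x ∈ xs, f x < l) := by
  intro xs
  induction xs with
  | nil => intro init l; simp
  | cons x t ih =>
    intro init l
    rw [List.foldl_cons, ih]
    simp only [List.mem_cons]
    constructor
    · rintro ⟨h1, h2⟩
      refine ⟨by omega, ?_⟩
      intro y hy
      rcases hy with rfl | hyt
      · omega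
      · exact h2 y hyt
    · rintro ⟨h1, h2⟩
      refine ⟨?_, ?_⟩
      · have := h2 x (Or.inl rfl); omega
      · intro y hyt; exact h2 y (Or.inr hyt)

theorem pv_zip_of_pairwise {α : Type} {R : α → α → Prop} :
    ∀ (s : List α), s.Pairwise R → ∀ p ∈ s.zip s.tail, R p.1 p.2 := by
  intro s
  induction s with
  | nil => intro _ p hp; simp at hp
  | cons a s ih =>
    intro hpw p hp
    cases s with
    | nil => simp at hp
    | cons b t =>
      simp only [List.tail_cons, List.zip_cons_cons, List.mem_cons] at hp
      rcases hp with rfl | hp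
      · exact (List.pairwise_cons.mp hpw).1 b (by simp)
      · exact ih (List.pairwise_cons.mp hpw).2 p (by simpa using hp)

theorem pv_pairwise_of_zip (l : Nat) :
    ∀ (s : List String), s.Pairwise (· ≤ ·) →
      (∀ p ∈ s.zip s.tail, (String.toList p.1).take l ≠ (String.toList p.2).take l) →
      s.Pairwise (fun a b => (String.toList a).take l ≠ (String.toList b).take l) := by
  intro s
  induction s with
  | nil => intro _ _; exact List.Pairwise.nil
  | cons a s ih =>
    intro hpw hz
    cases s with
    | nil => simp
    | cons b t =>
      have hpw' := List.pairwise_cons.mp hpw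
      have hzadj : (String.toList a).take l ≠ (String.toList b).take l :=
        hz (a, b) (by simp)
      have hztail : ∀ p ∈ (b :: t).zip (b :: t).tail,
          (String.toList p.1).take l ≠ (String.toList p.2).take l := by
        intro p hp
        refine hz p ?_
        simp only [List.tail_cons, List.zip_cons_cons, List.mem_cons]
        right
        simpa using hp
      have hrec := ih hpw'.2 hztail
      refine List.Pairwise.cons ?_ hrec
      intro c hc
      rcases List.mem_cons.mp hc with rfl | hct
      · exact hzadj
      · have hab : a ≤ b := hpw'.1 b (by simp)
        have hbc : b ≤ c := (List.pairwise_cons.mp hpw'.2).1 c hct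
        intro heq
        have h1 : (String.toList a).take l ≤ (String.toList b).take l :=
          pv_take_mono l (String.le_iff_toList_le.mp hab)
        have h2 : (String.toList b).take l ≤ (String.toList c).take l :=
          pv_take_mono l (String.le_iff_toList_le.mp hbc)
        have h2' : (String.toList b).take l ≤ (String.toList a).take l := by
          rw [heq]; exact h2
        exact hzadj (le_antisymm h1 h2')

theorem pv_find?_pyRange (mv : Int) :
    ∀ (k : Nat) (a : Int) (p : Int → Bool), (∀ L, a ≤ L → L < a + k → p L = decide (mv < L)) →
      List.find? p (PySem.List.pyRange a (a + k)) =
        (if max a (mv + 1) < a + k then some (max a (mv + 1)) else none) := by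
  intro k
  induction k with
  | zero =>
    intro a p _
    have h1 : PySem.List.pyRange a (a + ((0 : Nat) : Int)) = [] := by
      simp [PySem.List.pyRange]
    rw [h1, if_neg (by omega)]
    simp
  | succ k ih =>
    intro a p hp
    have hlt : a < a + ((k + 1 : Nat) : Int) := by omega
    rw [PySem.List.pyRange_one_cons hlt]
    by_cases hmv : mv < a
    · rw [List.find?_cons_of_pos (by rw [hp a le_rfl (by omega)]; exact decide_eq_true hmv)]
      rw [if_pos (by omega)]
      congr 1
      omega
    · rw [List.find?_cons_of_neg (by rw [hp a le_rfl (by omega)]; simp [hmv])]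
      have e : a + ((k + 1 : Nat) : Int) = (a + 1) + (k : Int) := by push_cast; ring
      rw [e, ih (a + 1) p (by intro L h1 h2; exact hp L (by omega) (by omega))]
      have e2 : max (a + 1) (mv + 1) = max a (mv + 1) := by omega
      rw [e2]

theorem pv_aFind_eq_find? (ids : List String) (n : Nat) :
    ∀ (ls : List Int), pvAFind ids n ls =
      ls.find? (fun L => decide ((PySem.Set.ofList (ids.map (fun t => PySem.Str.upper (PySem.Str.slice t none (some L))))).length = n)) := by
  intro ls
  induction ls with
  | nil => rfl
  | cons L rest ih =>
    by_cases hc : (PySem.Set.ofList (ids.map (fun t => PySem.Str.upper (PySem.Str.slice t none (some L))))).length = n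
    · rw [List.find?_cons_of_pos (by simpa using hc)]
      simp [pvAFind, hc]
    · rw [List.find?_cons_of_neg (by simpa using hc)]
      simp [pvAFind, hc, ih]

-- the value B folds over one adjacent pair
def pvPairVal (maxLen : Nat) (a b : String) : Nat :=
  if a = b then maxLen else pvLcp a.toList b.toList

def pvMOf (idsA : List String) (maxLen : Nat) : Nat :=
  let s := PySem.List.sorted (idsA.map PySem.Str.upper) (fun x => x)
  (s.zip s.tail).foldl (fun m p => max m (pvPairVal maxLen p.1 p.2)) 0

-- the central equivalence: A's distinctness test at length l is exactly "l exceeds B's max adjacent lcp"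
theorem pv_distinct_iff (idsA : List String) (maxLen l : Nat) (hl1 : 1 ≤ l) (hlm : l ≤ maxLen) :
    ((PySem.Set.ofList (idsA.map (fun t => PySem.Str.upper (PySem.Str.slice t none (some (l : Int)))))).length = idsA.length)
      ↔ pvMOf idsA maxLen < l := by
  have hinj : Function.Injective String.toList := fun _ _ h => String.toList_inj.mp h
  have hgl : ∀ t : String, (PySem.Str.upper (PySem.Str.slice t none (some (l : Int)))).toList
      = (PySem.Chars.upper t.toList).take l := by
    intro t
    rw [PySem.Str.toList_upper, PySem.Str.toList_slice, PySem.Chars.slice_eq_listSlice,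
        PySem.List.slice_to_natCast]
    simp [PySem.Chars.upper, List.map_take]
  have e1 : idsA.length = (idsA.map (fun t => PySem.Str.upper (PySem.Str.slice t none (some (l : Int))))).length :=
    (List.length_map ..).symm
  rw [e1, pv_setOfList_len_iff_nodup]
  set s := PySem.List.sorted (idsA.map PySem.Str.upper) (fun x => x) with hsdef
  have hperm : (s.map (fun x => (String.toList x).take l)).Perm
      (idsA.map (fun t => (PySem.Chars.upper t.toList).take l)) := by
    have h1 : s.Perm (idsA.map PySem.Str.upper) := PySem.List.sorted_perm ..
    have h2 := h1.map (fun t => (String.toList t).take l)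
    rw [List.map_map] at h2
    simp only [Function.comp_def] at h2
    have h3 : idsA.map (fun t => (String.toList (PySem.Str.upper t)).take l)
        = idsA.map (fun t => (PySem.Chars.upper t.toList).take l) := by
      apply List.map_congr_left
      intro t _
      rw [PySem.Str.toList_upper]
    rw [h3] at h2
    exact h2
  have step2 : (idsA.map (fun t => PySem.Str.upper (PySem.Str.slice t none (some (l : Int))))).Nodup
      ↔ (s.map (fun x => (String.toList x).take l)).Nodup := by
    rw [← List.nodup_map_iff hinj
      (l := idsA.map (fun t => PySem.Str.upper (PySem.Str.slice t none (some (l : Int)))))]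
    rw [List.map_map]
    simp only [Function.comp_def]
    have hmapeq : idsA.map (fun t => String.toList (PySem.Str.upper (PySem.Str.slice t none (some (l : Int)))))
        = idsA.map (fun t => (PySem.Chars.upper t.toList).take l) := by
      apply List.map_congr_left
      intro t _
      exact hgl t
    rw [hmapeq]
    exact hperm.nodup_iff.symm
  have hpw : s.Pairwise (· ≤ ·) := by
    have := PySem.List.sorted_pairwise (idsA.map PySem.Str.upper) (fun x => x)
    simpa using this
  have step3 : (s.map (fun x => (String.toList x).take l)).Nodup
      ↔ s.Pairwise (fun a b => (String.toList a).take l ≠ (String.toList b).take l) := by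
    unfold List.Nodup
    rw [List.pairwise_map]
  have step4 : s.Pairwise (fun a b => (String.toList a).take l ≠ (String.toList b).take l)
      ↔ ∀ p ∈ s.zip s.tail, (String.toList p.1).take l ≠ (String.toList p.2).take l := by
    constructor
    · intro h; exact pv_zip_of_pairwise s h
    · intro h; exact pv_pairwise_of_zip l s hpw h
  have hPV : ∀ a b : String,
      (pvPairVal maxLen a b < l ↔ (String.toList a).take l ≠ (String.toList b).take l) := by
    intro a b
    unfold pvPairVal
    by_cases hab : a = b
    · subst hab
      rw [if_pos rfl]
      simp only [ne_eq, not_true_eq_false, iff_false, not_lt]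
      omega
    · rw [if_neg hab]
      have hab' : a.toList ≠ b.toList := fun e => hab (hinj e)
      rw [ne_eq, pv_take_eq_iff_le_lcp a.toList b.toList l hab']
      omega
  have step5 : (∀ p ∈ s.zip s.tail, (String.toList p.1).take l ≠ (String.toList p.2).take l)
      ↔ pvMOf idsA maxLen < l := by
    unfold pvMOf
    rw [← hsdef]
    rw [pv_foldl_max_lt (fun p => pvPairVal maxLen p.1 p.2) (s.zip s.tail) 0 l]
    constructor
    · intro h
      exact ⟨by omega, fun p hp => (hPV p.1 p.2).mpr (h p hp)⟩
    · rintro ⟨-, h⟩ p hp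
      exact (hPV p.1 p.2).mp (h p hp)
  exact ((step2.trans step3).trans step4).trans step5

theorem pv_foldl_max_len (h0 : String) (t0 : List String) :
    t0.foldl (fun m s => max m s.toList.length) h0.toList.length
      = ((h0 :: t0).map (fun s => s.toList.length)).foldl max 0 := by
  rw [List.map_cons, List.foldl_cons, List.foldl_map]
  simp

theorem pv_maxlen_perm (idsA : List String) (h0 : String) (t0 : List String) (hA : idsA = h0 :: t0)
    (h1 : String) (t1 : List String)
    (hs : PySem.List.sorted (idsA.map PySem.Str.upper) (fun x => x) = h1 :: t1) :
    t0.foldl (fun m s => max m s.toList.length) h0.toList.length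
      = t1.foldl (fun m s => max m s.toList.length) h1.toList.length := by
  rw [pv_foldl_max_len, pv_foldl_max_len, ← hA, ← hs]
  have hperm : ((PySem.List.sorted (idsA.map PySem.Str.upper) (fun x => x)).map (fun s => s.toList.length)).Perm
      (idsA.map (fun s => s.toList.length)) := by
    have hp := (PySem.List.sorted_perm (idsA.map PySem.Str.upper) (fun x => x) false).map
      (fun s => s.toList.length)
    rw [List.map_map] at hp
    simp only [Function.comp_def] at hp
    have h2 : idsA.map (fun s => (PySem.Str.upper s).toList.length) = idsA.map (fun s => s.toList.length) := by
      apply List.map_congr_left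
      intro t _
      simp [PySem.Str.toList_upper, PySem.Chars.upper]
    rwa [h2] at hp
  haveI : RightCommutative (max : Nat → Nat → Nat) := ⟨fun a b c => by omega⟩
  exact (hperm.foldl_eq 0).symm

theorem pv_prefix_eq (idsA : List String) :
    pvGetDisplayPrefixLength idsA = pvBPrefixLen (PySem.List.sorted (idsA.map PySem.Str.upper) (fun x => x)) := by
  cases hA : idsA with
  | nil =>
    rw [show PySem.List.sorted ((([] : List String)).map PySem.Str.upper) (fun x => x) = [] from rfl]
    rfl
  | cons h0 t0 =>
    obtain ⟨h1, t1, hs⟩ : ∃ h1 t1, PySem.List.sorted ((h0 :: t0).map PySem.Str.upper) (fun x => x) = h1 :: t1 := by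
      rcases hsort : PySem.List.sorted ((h0 :: t0).map PySem.Str.upper) (fun x => x) with _ | ⟨h1, t1⟩
      · have := (PySem.List.sorted_eq_nil_iff _ _ _).mp hsort
        simp at this
      · exact ⟨h1, t1, rfl⟩
    rw [hs]
    simp only [pvGetDisplayPrefixLength, pvBPrefixLen]
    set mlA := t0.foldl (fun m s => max m s.toList.length) h0.toList.length with hmlA
    set mlB := t1.foldl (fun m s => max m s.toList.length) h1.toList.length with hmlB
    have hml : mlA = mlB := pv_maxlen_perm (h0 :: t0) h0 t0 rfl h1 t1 hs
    have hzipB : PySem.List.slice (h1 :: t1) (some 1) none = t1 := by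
      rw [PySem.List.slice_from_one]; rfl
    have hm : ((h1 :: t1).zip (PySem.List.slice (h1 :: t1) (some 1) none)).foldl
        (fun m p => max m (if p.1 = p.2 then mlB else pvLcp p.1.toList p.2.toList)) 0
        = pvMOf (h0 :: t0) mlB := by
      unfold pvMOf
      rw [hs, hzipB]
      rfl
    rw [hm]
    set m := pvMOf (h0 :: t0) mlB with hmdef
    rw [pv_aFind_eq_find?]
    by_cases hM : 8 ≤ mlA
    · have hk : (mlA : Int) + 1 = 8 + ((mlA - 7 : Nat) : Int) := by omega
      rw [hk, pv_find?_pyRange (m : Int) (mlA - 7) 8 _ ?_]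
      · by_cases hc : max (8 : Int) ((m : Int) + 1) < 8 + ((mlA - 7 : Nat) : Int)
        · rw [if_pos hc, Option.getD_some]
          omega
        · rw [if_neg hc, Option.getD_none]
          omega
      · intro L hL1 hL2
        have hl0 : ((L.toNat : Int)) = L := Int.toNat_of_nonneg (by omega)
        rw [← hl0]
        rw [decide_eq_decide]
        have hbound : L.toNat ≤ mlB := by omega
        have := pv_distinct_iff (h0 :: t0) mlB L.toNat (by omega) hbound
        rw [this, ← hmdef]
        constructor
        · intro h; exact_mod_cast h
        · intro h; exact_mod_cast h
    · have hempty : PySem.List.pyRange 8 ((mlA : Int) + 1) = [] := by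
        have h8 : ¬ ((8 : Int) < (mlA : Int) + 1) := by omega
        simp [PySem.List.pyRange, h8]
      rw [hempty]
      simp only [List.find?_nil, Option.getD_none]
      omega

-- ===== VERDICT (by name: the statement is the Claim_ definition above) =====
theorem format_page_list_spec : Claim_equal_format_page_list := by
  unfold Claim_equal_format_page_list
  intro pages _
  unfold Spec_format_page_list format_page_list format_page_list_alt
  simp only [PySem.List.foldl_append_if, PySem.List.foldl_append_singleton_eq_map, List.nil_append]
  rw [pv_prefix_eq, List.map_map]
  simp only [Function.comp_def]
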